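-- pv_equiv track=rewrite | github.com/Seonghun337/algorithm | StudyLog/BOJ_2529_부등호.py | searchMax
-- ===== SOURCE A (Python) =====
-- def getValidIneqs(ineqs, reverse = False):
--     if reverse: # >
--         n = len(ineqs)+1
--         result = [0 for _ in range(n)]
--         for i in range(n-2,-1,-1):
--             if ineqs[i] == '>':
--                 for j in range(i,-1,-1):
--                     result[j] = result[j] + 1
--                     if j > 0 and ineqs[j-1] != '>':
--                         break
--         return result
--     else: # <
--         # n = len(ineqs)+1
--         # result = [0 for _ in range(n)]
--         # for i in range(len(ineqs)):
--         #     if ineqs[i] == '<':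
--         #         for j in range(i+1,n):
--         #             result[j] = result[j] + 1
--         #             if j < n-1 and ineqs[j] != '<':
--         #                 break
--         # return result
--         n = len(ineqs)+1
--         result = [0 for _ in range(n)]
--         for i in range(n-2,-1,-1):
--             if ineqs[i] == '<':
--                 for j in range(i,-1,-1):
--                     result[j] = result[j] + 1
--                     if j > 0 and ineqs[j-1] != '<':
--                         break
--         return result
--
-- def searchMax(ineqs,k):
--     v_ineqs = getValidIneqs(ineqs)
--     nums = [x for x in range(9,8-k,-1)]
--     result = []
--     for i in range(k+1):
--         result.append(nums[v_ineqs[i]])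
--         del nums[v_ineqs[i]]
--     return ''.join(list(map(str,result)))
-- ===== SOURCE B (Python) =====
-- def searchMax(ineqs, k):
--     # Maximum digit string: take the k+1 largest digits in decreasing order and
--     # reverse each maximal block of consecutive '<' constraints (any other
--     # inequality token keeps the decreasing order).
--     if k < 0:
--         return ""
--     digits = list(range(9, 8 - k, -1))
--     out = []
--     i = 0
--     while i <= k:
--         j = i
--         while j < k and ineqs[j] == '<':
--             j += 1
--         out.extend(reversed(digits[i:j + 1]))
--         i = j + 1
--     return ''.join(map(str, out))
-- ===== Notes on version B (the rewrite author's own statement) =====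
-- stated objective: faster
-- what changed: A builds a per-index '<'-run-length table with a quadratic nested loop and then repeatedly indexes into and deletes from a shrinking digit list; B makes one left-to-right pass over the descending digit list 9..9-k, reversing each maximal block of consecutive '<' constraints in place.
import Mathlib
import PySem

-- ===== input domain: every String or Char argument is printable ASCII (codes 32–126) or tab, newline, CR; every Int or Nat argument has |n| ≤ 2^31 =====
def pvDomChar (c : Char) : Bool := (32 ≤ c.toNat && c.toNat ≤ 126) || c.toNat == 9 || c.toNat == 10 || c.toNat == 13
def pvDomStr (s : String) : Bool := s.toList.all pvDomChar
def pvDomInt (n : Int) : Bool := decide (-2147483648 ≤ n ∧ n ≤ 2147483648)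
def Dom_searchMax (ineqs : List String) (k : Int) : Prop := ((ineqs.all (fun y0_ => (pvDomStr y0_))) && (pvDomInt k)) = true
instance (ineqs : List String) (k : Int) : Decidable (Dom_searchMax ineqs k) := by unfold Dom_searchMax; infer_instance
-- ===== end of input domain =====

-- B replaces A's run-count table plus repeated indexed deletion with a single left-to-right
-- pass that reverses each maximal '<'-block of the descending digit list (objective: faster, O(k) vs O(k^2)).

-- ===== PORT A =====
-- inner loop 'for j in range(i,-1,-1): result[j] += 1; if j > 0 and ineqs[j-1] != c: break'
def pvInnerA (c : String) (ineqs : List String) : Nat → List Int → List Int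
  | 0, res => res.set 0 (res.getD 0 0 + 1)
  | j+1, res =>
    let res' := res.set (j+1) (res.getD (j+1) 0 + 1)
    if ineqs.getD j "" ≠ c then res'
    else pvInnerA c ineqs j res'

def getValidIneqs (ineqs : List String) (reverse : Bool) : List Int :=
  if reverse then
    let n : Int := ineqs.length + 1
    let result : List Int := (PySem.List.pyRange 0 n 1).map (fun _ => 0)
    (PySem.List.pyRange (n - 2) (-1) (-1)).foldl
      (fun res i => if PySem.List.pyGetD ineqs i "" = ">" then pvInnerA ">" ineqs i.toNat res else res)
      result
  else
    let n : Int := ineqs.length + 1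
    let result : List Int := (PySem.List.pyRange 0 n 1).map (fun _ => 0)
    (PySem.List.pyRange (n - 2) (-1) (-1)).foldl
      (fun res i => if PySem.List.pyGetD ineqs i "" = "<" then pvInnerA "<" ineqs i.toNat res else res)
      result

def searchMax (ineqs : List String) (k : Int) : String :=
  let v := getValidIneqs ineqs false
  let nums : List Int := PySem.List.pyRange 9 (8 - k) (-1)
  -- for i in range(k+1): result.append(nums[v[i]]); del nums[v[i]]
  let st := (PySem.List.pyRange 0 (k + 1) 1).foldl
    (fun (st : List Int × List Int) i =>
      let idx := PySem.List.pyGetD v i 0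
      (st.1.eraseIdx idx.toNat, st.2 ++ [PySem.List.pyGetD st.1 idx 0]))
    (nums, [])
  PySem.Str.join "" (st.2.map PySem.Int.toStr)

-- ===== PORT B =====
-- 'while j < k and ineqs[j] == "<": j += 1'
def pvRunEnd (ineqs : List String) (k : Nat) (j : Nat) : Nat :=
  if h : j < k ∧ ineqs.getD j "" = "<" then pvRunEnd ineqs k (j + 1) else j
termination_by k - j
decreasing_by omega

theorem pvRunEnd_ge (ineqs : List String) (k : Nat) : ∀ j, j ≤ pvRunEnd ineqs k j := by
  intro j
  induction hn : k - j using Nat.strong_induction_on generalizing j with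
  | _ n ih =>
    rw [pvRunEnd]
    split
    · rename_i h
      have := ih (k - (j + 1)) (by omega) (j + 1) rfl
      omega
    · exact le_refl j

-- outer 'while i <= k' loop of B, building the digit list block by block
def pvBuildB (ineqs : List String) (k : Nat) (digits : List Int) (i : Nat) : List Int :=
  if _h : i ≤ k then
    let j := pvRunEnd ineqs k i
    (PySem.List.slice digits (some (i : Int)) (some ((j : Int) + 1))).reverse
      ++ pvBuildB ineqs k digits (j + 1)
  else []
termination_by k + 1 - i
decreasing_by have := pvRunEnd_ge ineqs k i; omega

def searchMax_alt (ineqs : List String) (k : Int) : String :=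
  if k < 0 then ""
  else
    let digits : List Int := PySem.List.pyRange 9 (8 - k) (-1)
    PySem.Str.join "" ((pvBuildB ineqs k.toNat digits 0).map PySem.Int.toStr)

-- ===== PRECONDITION & SPEC =====
-- Pre_ excludes exactly the inputs on which A raises IndexError: for 0 ≤ k that happens
-- iff k > len(ineqs) or ineqs[k] == '<' (a '<'-run would need more digits than remain).
def Pre_searchMax (ineqs : List String) (k : Int) : Prop :=
  k < 0 ∨ (k ≤ ineqs.length ∧ (k = ineqs.length ∨ PySem.List.pyGetD ineqs k "" ≠ "<"))
instance (ineqs : List String) (k : Int) : Decidable (Pre_searchMax ineqs k) := by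
  unfold Pre_searchMax; infer_instance

def pvWitness_searchMax : List String × Int := (["<", ">"], 2)

def Spec_searchMax (ineqs : List String) (k : Int) (out : String) : Prop := out = searchMax_alt ineqs k
instance (ineqs : List String) (k : Int) (out : String) : Decidable (Spec_searchMax ineqs k out) := by
  unfold Spec_searchMax; infer_instance

-- ===== CLAIM (what is proved, stated in full; the proofs are below) =====
def Claim_equal_searchMax : Prop := ∀ (ineqs : List String) (k : Int),
  Dom_searchMax ineqs k → Pre_searchMax ineqs k → Spec_searchMax ineqs k (searchMax ineqs k)

-- ===== LEMMAS AND PROOFS =====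

-- length of the maximal run of "<" starting at index i
def pvLtRun (ineqs : List String) (i : Nat) : Nat :=
  if h : i < ineqs.length ∧ ineqs.getD i "" = "<" then pvLtRun ineqs (i + 1) + 1 else 0
termination_by ineqs.length - i
decreasing_by omega

theorem pvLtRun_zero_of (ineqs : List String) (i : Nat)
    (h : ¬(i < ineqs.length ∧ ineqs.getD i "" = "<")) : pvLtRun ineqs i = 0 := by
  rw [pvLtRun, dif_neg h]

theorem pvLtRun_succ (ineqs : List String) (i : Nat)
    (h : i < ineqs.length ∧ ineqs.getD i "" = "<") :
    pvLtRun ineqs i = pvLtRun ineqs (i + 1) + 1 := by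
  rw [pvLtRun, dif_pos h]

theorem pvLtRun_mem (ineqs : List String) :
    ∀ (d t : Nat), d < pvLtRun ineqs t → t + d < ineqs.length ∧ ineqs.getD (t + d) "" = "<" := by
  intro d
  induction d with
  | zero =>
    intro t hd
    by_cases h : t < ineqs.length ∧ ineqs.getD t "" = "<"
    · simpa using h
    · rw [pvLtRun_zero_of ineqs t h] at hd; omega
  | succ d ih =>
    intro t hd
    by_cases h : t < ineqs.length ∧ ineqs.getD t "" = "<"
    · rw [pvLtRun_succ ineqs t h] at hd
      have := ih (t + 1) (by omega)
      constructor
      · omega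
      · have heq : t + 1 + d = t + (d + 1) := by omega
        rw [heq] at this; exact this.2
    · rw [pvLtRun_zero_of ineqs t h] at hd; omega

theorem pvLtRun_add (ineqs : List String) (t m : Nat) (htm : t ≤ m) (hm : m ≤ ineqs.length)
    (hrun : ∀ u, t ≤ u → u < m → ineqs.getD u "" = "<") :
    pvLtRun ineqs t = (m - t) + pvLtRun ineqs m := by
  induction hn : m - t using Nat.strong_induction_on generalizing t with
  | _ n ih =>
    by_cases he : t = m
    · subst he; simp at hn; omega
    · have ht : t < m := by omega
      have hc : t < ineqs.length ∧ ineqs.getD t "" = "<" :=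
        ⟨by omega, hrun t le_rfl ht⟩
      rw [pvLtRun_succ ineqs t hc]
      have := ih (m - (t + 1)) (by omega) (t + 1) (by omega)
        (fun u hu1 hu2 => hrun u (by omega) hu2) rfl
      omega

theorem pvLtRun_run_iff (ineqs : List String) (t m : Nat) (htm : t ≤ m) (hm : m ≤ ineqs.length) :
    (∀ u, t ≤ u → u < m → ineqs.getD u "" = "<") ↔ m - t ≤ pvLtRun ineqs t := by
  constructor
  · intro h
    rw [pvLtRun_add ineqs t m htm hm h]; omega
  · intro h u hu1 hu2
    have := pvLtRun_mem ineqs (u - t) t (by omega)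
    have heq : t + (u - t) = u := by omega
    rw [heq] at this; exact this.2

-- the value at index j of A's table after the outer loop has processed indices ≥ i0
def pvFRes (ineqs : List String) (i0 j : Nat) : Int :=
  if i0 ≤ j then (pvLtRun ineqs j : Int)
  else if i0 - j ≤ pvLtRun ineqs j then (pvLtRun ineqs i0 : Int) else 0

theorem pvInnerA_length (c : String) (ineqs : List String) :
    ∀ j res, (pvInnerA c ineqs j res).length = res.length := by
  intro j
  induction j with
  | zero => intro res; simp [pvInnerA]
  | succ j ih =>
    intro res
    simp only [pvInnerA]
    split
    · simp
    · rw [ih]; simp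

theorem pvGetD_set (res : List Int) (j : Nat) (x : Int) (t : Nat) (hj : j < res.length) :
    (res.set j x).getD t 0 = if t = j then x else res.getD t 0 := by
  rcases Nat.lt_or_ge t res.length with ht | ht
  · rw [List.getD_eq_getElem _ _ (by simpa using ht), List.getD_eq_getElem _ _ ht,
      List.getElem_set]
    by_cases h : t = j
    · subst h; simp
    · rw [if_neg (fun hh => h hh.symm), if_neg h]
  · rw [List.getD_eq_default _ _ (by simpa using ht), List.getD_eq_default _ _ ht]
    have : t ≠ j := by omega
    simp [this]

theorem pvInnerA_getD (c : String) (ineqs : List String) :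
    ∀ (j : Nat) (res : List Int) (t : Nat), j < res.length →
      (pvInnerA c ineqs j res).getD t 0 =
        if t ≤ j ∧ (∀ u : Nat, t ≤ u → u < j → ineqs.getD u "" = c)
        then res.getD t 0 + 1 else res.getD t 0 := by
  intro j
  induction j with
  | zero =>
    intro res t hj
    simp only [pvInnerA]
    rw [pvGetD_set res 0 _ t hj]
    by_cases h : t = 0
    · subst h
      rw [if_pos rfl, if_pos ⟨le_refl 0, fun u hu1 hu2 => absurd hu2 (by omega)⟩]
    · rw [if_neg h, if_neg (by rintro ⟨h1, _⟩; exact h (by omega))]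
  | succ j ih =>
    intro res t hj
    simp only [pvInnerA]
    split
    · rename_i hbreak
      rw [pvGetD_set res (j+1) _ t hj]
      by_cases h : t = j + 1
      · subst h
        rw [if_pos rfl, if_pos ⟨le_refl _, fun u hu1 hu2 => absurd hu2 (by omega)⟩]
      · rw [if_neg h, if_neg (by
          rintro ⟨h1, h2⟩
          exact hbreak (h2 j (by omega) (by omega)))]
    · rename_i hnb
      have hc : ineqs.getD j "" = c := by
        by_contra hcc; exact hnb hcc
      rw [ih _ t (by rw [List.length_set]; omega), pvGetD_set res (j+1) _ t hj]
      by_cases h1 : t = j + 1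
      · subst h1
        rw [if_neg (by rintro ⟨hh, _⟩; omega), if_pos rfl,
          if_pos ⟨le_refl _, fun u hu1 hu2 => absurd hu2 (by omega)⟩]
      · rw [if_neg h1]
        by_cases h2 : t ≤ j
        · have hiff : (∀ u : Nat, t ≤ u → u < j → ineqs.getD u "" = c) ↔
              (∀ u : Nat, t ≤ u → u < j + 1 → ineqs.getD u "" = c) := by
            constructor
            · intro h u hu1 hu2
              rcases Nat.lt_or_ge u j with hu | hu
              · exact h u hu1 hu
              · have : u = j := by omega
                subst this; exact hc
            · intro h u hu1 hu2; exact h u hu1 (by omega)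
          by_cases h3 : ∀ u : Nat, t ≤ u → u < j → ineqs.getD u "" = c
          · rw [if_pos ⟨h2, h3⟩, if_pos ⟨by omega, hiff.mp h3⟩]
          · rw [if_neg (by rintro ⟨_, hh⟩; exact h3 hh),
              if_neg (by rintro ⟨_, hh⟩; exact h3 (hiff.mpr hh))]
        · rw [if_neg (by rintro ⟨hh, _⟩; omega), if_neg (by rintro ⟨hh, _⟩; omega)]

theorem pvGetD_map_range (f : Nat → Int) (n t : Nat) (ht : t < n) :
    ((List.range n).map f).getD t 0 = f t := by
  rw [List.getD_eq_getElem _ _ (by simpa using ht)]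
  simp

theorem pvFRes_zero (ineqs : List String) (j : Nat) :
    pvFRes ineqs 0 j = (pvLtRun ineqs j : Int) := by
  unfold pvFRes
  rw [if_pos (Nat.zero_le j)]

theorem pvFRes_step_nolt (ineqs : List String) (i0 : Nat) (h : i0 < ineqs.length)
    (hlt : ineqs.getD i0 "" ≠ "<") (j : Nat) :
    pvFRes ineqs (i0 + 1) j = pvFRes ineqs i0 j := by
  have h0 : pvLtRun ineqs i0 = 0 := pvLtRun_zero_of ineqs i0 (by rintro ⟨_, hh⟩; exact hlt hh)
  unfold pvFRes
  rcases Nat.lt_trichotomy j i0 with hj | hj | hj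
  · have hn1 : ¬ (i0 + 1 - j ≤ pvLtRun ineqs j) := by
      intro hh
      have := (pvLtRun_run_iff ineqs j (i0 + 1) (by omega) (by omega)).mpr hh i0 (by omega) (by omega)
      exact hlt this
    rw [if_neg (show ¬ (i0 + 1 ≤ j) from by omega), if_neg (show ¬ (i0 ≤ j) from by omega),
      if_neg hn1]
    by_cases h2 : i0 - j ≤ pvLtRun ineqs j
    · rw [if_pos h2, h0]; simp
    · rw [if_neg h2]
  · subst hj
    rw [if_neg (show ¬ (j + 1 ≤ j) from by omega), if_pos (le_refl j)]
    have he : j + 1 - j = 1 := by omega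
    rw [he, if_neg (show ¬ (1 ≤ pvLtRun ineqs j) from by omega), h0]
    simp
  · rw [if_pos (show i0 + 1 ≤ j from by omega), if_pos (show i0 ≤ j from by omega)]

theorem pvFRes_step_lt (ineqs : List String) (i0 : Nat) (h : i0 < ineqs.length)
    (hlt : ineqs.getD i0 "" = "<") (t : Nat) :
    (if t ≤ i0 ∧ (∀ u : Nat, t ≤ u → u < i0 → ineqs.getD u "" = "<")
     then pvFRes ineqs (i0 + 1) t + 1 else pvFRes ineqs (i0 + 1) t) = pvFRes ineqs i0 t := by
  have hsucc : pvLtRun ineqs i0 = pvLtRun ineqs (i0 + 1) + 1 := pvLtRun_succ ineqs i0 ⟨h, hlt⟩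
  unfold pvFRes
  rcases Nat.lt_trichotomy t i0 with ht | ht | ht
  · by_cases hr : ∀ u : Nat, t ≤ u → u < i0 → ineqs.getD u "" = "<"
    · have hrun1 : i0 - t ≤ pvLtRun ineqs t :=
        (pvLtRun_run_iff ineqs t i0 (by omega) (by omega)).mp hr
      have hrun2 : i0 + 1 - t ≤ pvLtRun ineqs t := by
        refine (pvLtRun_run_iff ineqs t (i0 + 1) (by omega) (by omega)).mp ?_
        intro u hu1 hu2
        rcases Nat.lt_or_ge u i0 with hu | hu
        · exact hr u hu1 hu
        · have : u = i0 := by omega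
          subst this; exact hlt
      rw [if_pos ⟨by omega, hr⟩, if_neg (show ¬ (i0 + 1 ≤ t) from by omega),
        if_pos hrun2, if_neg (show ¬ (i0 ≤ t) from by omega), if_pos hrun1, hsucc]
      push_cast; ring
    · have hn1 : ¬ (i0 - t ≤ pvLtRun ineqs t) := by
        intro hh
        exact hr ((pvLtRun_run_iff ineqs t i0 (by omega) (by omega)).mpr hh)
      have hn2 : ¬ (i0 + 1 - t ≤ pvLtRun ineqs t) := by omega
      rw [if_neg (by rintro ⟨_, hh⟩; exact hr hh), if_neg (show ¬ (i0 + 1 ≤ t) from by omega),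
        if_neg hn2, if_neg (show ¬ (i0 ≤ t) from by omega), if_neg hn1]
  · subst ht
    rw [if_pos ⟨le_refl t, fun u hu1 hu2 => absurd hu2 (by omega)⟩,
      if_neg (show ¬ (t + 1 ≤ t) from by omega), if_pos (le_refl t)]
    have h1 : t + 1 - t = 1 := by omega
    rw [h1, if_pos (show 1 ≤ pvLtRun ineqs t from by omega), hsucc]
    push_cast; ring
  · rw [if_neg (by rintro ⟨hh, _⟩; omega), if_pos (show i0 + 1 ≤ t from by omega),
      if_pos (show i0 ≤ t from by omega)]

theorem pvStep_eq (ineqs : List String) (i0 : Nat) (h : i0 < ineqs.length) :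
    (if PySem.List.pyGetD ineqs (i0 : Int) "" = "<"
     then pvInnerA "<" ineqs ((i0 : Int)).toNat ((List.range (ineqs.length + 1)).map (pvFRes ineqs (i0 + 1)))
     else (List.range (ineqs.length + 1)).map (pvFRes ineqs (i0 + 1)))
    = (List.range (ineqs.length + 1)).map (pvFRes ineqs i0) := by
  rw [PySem.List.pyGetD_natCast, Int.toNat_natCast]
  by_cases hlt : ineqs.getD i0 "" = "<"
  · rw [if_pos hlt]
    have hlen : i0 < ((List.range (ineqs.length + 1)).map (pvFRes ineqs (i0 + 1))).length := by
      simp; omega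
    apply List.ext_getElem
    · rw [pvInnerA_length]; simp
    · intro t h1 h2
      rw [← List.getD_eq_getElem _ _ h1, ← List.getD_eq_getElem _ _ h2,
        pvInnerA_getD "<" ineqs i0 _ t hlen]
      have h2' : t < ineqs.length + 1 := by simpa using h2
      rw [pvGetD_map_range _ _ _ h2', pvGetD_map_range _ _ _ h2']
      exact pvFRes_step_lt ineqs i0 h hlt t
  · rw [if_neg hlt]
    apply List.map_congr_left
    intro j _
    exact pvFRes_step_nolt ineqs i0 h hlt j

theorem pvFold_down (ineqs : List String) :
    ∀ (i0 : Nat), i0 < ineqs.length →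
      (PySem.List.pyRange (i0 : Int) (-1) (-1)).foldl
        (fun res i => if PySem.List.pyGetD ineqs i "" = "<" then pvInnerA "<" ineqs i.toNat res else res)
        ((List.range (ineqs.length + 1)).map (pvFRes ineqs (i0 + 1)))
      = (List.range (ineqs.length + 1)).map (pvFRes ineqs 0) := by
  intro i0
  induction i0 with
  | zero =>
    intro h
    simp only [Nat.cast_zero]
    rw [PySem.List.pyRange_neg_one_cons (by omega : (-1 : Int) < 0)]
    have : ((0 : Int) - 1) = -1 := by omega
    rw [List.foldl_cons, this, PySem.List.pyRange_neg_one_eq_nil (by omega : (-1 : Int) ≤ -1),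
      List.foldl_nil]
    exact pvStep_eq ineqs 0 h
  | succ m ih =>
    intro h
    rw [PySem.List.pyRange_neg_one_cons (by push_cast; omega : (-1 : Int) < ((m + 1 : Nat) : Int))]
    have hc : ((m + 1 : Nat) : Int) - 1 = (m : Nat) := by push_cast; omega
    rw [List.foldl_cons, hc, pvStep_eq ineqs (m + 1) h]
    exact ih (by omega)

theorem pvInit_eq (ineqs : List String) :
    ((PySem.List.pyRange 0 ((ineqs.length : Int) + 1) 1).map (fun _ => (0 : Int)))
      = (List.range (ineqs.length + 1)).map (pvFRes ineqs ineqs.length) := by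
  have hl : (PySem.List.pyRange 0 ((ineqs.length : Int) + 1) 1).length = ineqs.length + 1 := by
    rw [PySem.List.length_pyRange_one]; omega
  have h0 : pvLtRun ineqs ineqs.length = 0 :=
    pvLtRun_zero_of ineqs _ (by rintro ⟨hh, _⟩; omega)
  apply List.ext_getElem
  · simp [hl]
  · intro t h1 h2
    simp only [List.getElem_map, List.getElem_range]
    have ht : t < ineqs.length + 1 := by simpa using h2
    unfold pvFRes
    rcases Nat.lt_or_ge t ineqs.length with hc | hc
    · rw [if_neg (by omega)]
      by_cases h3 : ineqs.length - t ≤ pvLtRun ineqs t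
      · rw [if_pos h3, h0]; simp
      · rw [if_neg h3]
    · have ht' : t = ineqs.length := by omega
      rw [if_pos (show ineqs.length ≤ t from by omega), ht', h0]; simp

theorem pvGvi_false (ineqs : List String) :
    getValidIneqs ineqs false =
      (List.range (ineqs.length + 1)).map (fun j => (pvLtRun ineqs j : Int)) := by
  unfold getValidIneqs
  rw [if_neg (by decide : ¬ (false = true))]
  rcases List.eq_nil_or_concat ineqs with hnil | ⟨_, _, h'⟩
  case inl =>
    subst hnil
    norm_num
    rw [pvLtRun_zero_of [] 0 (by simp)]
    simp
  case inr =>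
    have hlen : 0 < ineqs.length := by
      obtain ⟨l, a, rfl⟩ := h'; simp
    have hn2 : (ineqs.length : Int) + 1 - 2 = ((ineqs.length - 1 : Nat) : Int) := by
      push_cast [hlen]; omega
    simp only [hn2]
    have hfd := pvFold_down ineqs (ineqs.length - 1) (by omega)
    have hh : ineqs.length - 1 + 1 = ineqs.length := by omega
    rw [hh] at hfd
    rw [pvInit_eq ineqs, hfd]
    apply List.map_congr_left
    intro j _
    exact pvFRes_zero ineqs j

-- ---- selection side ----

def pvV (ineqs : List String) : List Int :=
  (List.range (ineqs.length + 1)).map (fun j => (pvLtRun ineqs j : Int))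

def pvG (ineqs : List String) (st : List Int × List Int) (i : Int) : List Int × List Int :=
  (st.1.eraseIdx (PySem.List.pyGetD (pvV ineqs) i 0).toNat,
   st.2 ++ [PySem.List.pyGetD st.1 (PySem.List.pyGetD (pvV ineqs) i 0) 0])

theorem pvV_getD (ineqs : List String) (u : Nat) (hu : u < ineqs.length + 1) :
    PySem.List.pyGetD (pvV ineqs) (u : Int) 0 = (pvLtRun ineqs u : Int) := by
  rw [PySem.List.pyGetD_natCast]
  exact pvGetD_map_range _ _ _ hu

theorem pvG_apply (ineqs : List String) (u : Nat) (hu : u < ineqs.length + 1) (r : Nat)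
    (hr : pvLtRun ineqs u = r) (nums acc : List Int) :
    pvG ineqs (nums, acc) (u : Int) = (nums.eraseIdx r, acc ++ [nums.getD r 0]) := by
  unfold pvG
  rw [pvV_getD ineqs u hu, hr, Int.toNat_natCast, PySem.List.pyGetD_natCast]

theorem pvRunEnd_le (ineqs : List String) (k : Nat) : ∀ i, i ≤ k → pvRunEnd ineqs k i ≤ k := by
  intro i
  induction hn : k - i using Nat.strong_induction_on generalizing i with
  | _ n ih =>
    intro hik
    rw [pvRunEnd]
    split
    · rename_i h
      exact ih (k - (i + 1)) (by omega) (i + 1) rfl (by omega)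
    · exact hik

theorem pvRunEnd_run (ineqs : List String) (k : Nat) :
    ∀ i u, i ≤ u → u < pvRunEnd ineqs k i → ineqs.getD u "" = "<" := by
  intro i
  induction hn : k - i using Nat.strong_induction_on generalizing i with
  | _ n ih =>
    intro u hu1 hu2
    rw [pvRunEnd] at hu2
    by_cases h : i < k ∧ ineqs.getD i "" = "<"
    · rw [dif_pos h] at hu2
      rcases Nat.lt_or_ge i u with hiu | hiu
      · exact ih (k - (i + 1)) (by omega) (i + 1) rfl u (by omega) (by
          rw [pvRunEnd] at hu2 ⊢; exact hu2)
      · have : u = i := by omega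
        subst this; exact h.2
    · rw [dif_neg h] at hu2
      omega

theorem pvRunEnd_stop (ineqs : List String) (k : Nat) :
    ∀ i, i ≤ k → pvRunEnd ineqs k i = k ∨ ineqs.getD (pvRunEnd ineqs k i) "" ≠ "<" := by
  intro i
  induction hn : k - i using Nat.strong_induction_on generalizing i with
  | _ n ih =>
    intro hik
    rw [pvRunEnd]
    by_cases h : i < k ∧ ineqs.getD i "" = "<"
    · rw [dif_pos h]
      exact ih (k - (i + 1)) (by omega) (i + 1) rfl (by omega)
    · rw [dif_neg h]
      rcases Nat.lt_or_ge i k with hik' | hik'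
      · right; intro hc; exact h ⟨hik', hc⟩
      · left; omega

theorem pvLtRun_eq_runEnd (ineqs : List String) (k : Nat)
    (hk : k ≤ ineqs.length) (hstop : k = ineqs.length ∨ ineqs.getD k "" ≠ "<")
    (i : Nat) (hik : i ≤ k) :
    ∀ u, i ≤ u → u ≤ pvRunEnd ineqs k i → pvLtRun ineqs u = pvRunEnd ineqs k i - u := by
  set j := pvRunEnd ineqs k i with hj
  have hjk : j ≤ k := pvRunEnd_le ineqs k i hik
  have hj0 : pvLtRun ineqs j = 0 := by
    rcases pvRunEnd_stop ineqs k i hik with hsj | hsj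
    · rw [← hj] at hsj
      rcases hstop with hs | hs
      · exact pvLtRun_zero_of ineqs j (by rw [hsj, hs]; rintro ⟨hh, _⟩; omega)
      · exact pvLtRun_zero_of ineqs j (by rw [hsj]; rintro ⟨_, hh⟩; exact hs hh)
    · exact pvLtRun_zero_of ineqs j (by rintro ⟨_, hh⟩; exact hsj hh)
  intro u hu1 hu2
  have hrun : ∀ v, u ≤ v → v < j → ineqs.getD v "" = "<" := by
    intro v hv1 hv2
    exact pvRunEnd_run ineqs k i v (by omega) (by rw [← hj]; omega)
  rw [pvLtRun_add ineqs u j hu2 (by omega) hrun, hj0]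
  omega

theorem pvPick_block (ineqs : List String) (j : Nat) (hjl : j < ineqs.length + 1) :
    ∀ (m : Nat) (nums acc : List Int), m ≤ j →
      (∀ u, m ≤ u → u ≤ j → pvLtRun ineqs u = j - u) → j - m < nums.length →
      (PySem.List.pyRange (m : Int) ((j : Int) + 1) 1).foldl (pvG ineqs) (nums, acc)
        = (nums.drop (j - m + 1), acc ++ (nums.take (j - m + 1)).reverse) := by
  intro m
  induction hn : j - m using Nat.strong_induction_on generalizing m with
  | _ n ih =>
    intro nums acc hmj hv hlen
    subst hn
    rw [PySem.List.pyRange_one_cons (show (m : Int) < (j : Int) + 1 from by omega),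
      List.foldl_cons,
      pvG_apply ineqs m (by omega) (j - m) (hv m le_rfl hmj) nums acc]
    by_cases he : m = j
    · subst he
      rw [PySem.List.pyRange_one_eq_nil (show (m : Int) + 1 ≤ (m : Int) + 1 from le_rfl),
        List.foldl_nil]
      simp only [Nat.sub_self] at hlen ⊢
      rcases nums with _ | ⟨x, xs⟩
      · simp at hlen
      · simp
    · have hmj' : m < j := by omega
      have he1 : ((m : Int) + 1) = ((m + 1 : Nat) : Int) := by push_cast; ring
      rw [he1, ih (j - (m + 1)) (by omega) (m + 1) rfl (nums.eraseIdx (j - m))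
        (acc ++ [nums.getD (j - m) 0]) (by omega)
        (fun u hu1 hu2 => hv u (by omega) hu2)
        (by rw [List.length_eraseIdx_of_lt hlen]; omega)]
      have hsplit : nums.eraseIdx (j - m) = nums.take (j - m) ++ nums.drop (j - m + 1) :=
        List.eraseIdx_eq_take_drop_succ nums (j - m)
      have htl : (nums.take (j - m)).length = j - m := by
        rw [List.length_take]; omega
      simp only [Prod.mk.injEq]
      refine ⟨?_, ?_⟩
      · show (nums.eraseIdx (j - m)).drop (j - (m + 1) + 1) = nums.drop (j - m + 1)
        rw [show j - (m + 1) + 1 = j - m from by omega, hsplit]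
        exact List.drop_left' htl
      · show acc ++ [nums.getD (j - m) 0] ++ ((nums.eraseIdx (j - m)).take (j - (m + 1) + 1)).reverse
          = acc ++ (nums.take (j - m + 1)).reverse
        rw [show j - (m + 1) + 1 = j - m from by omega, hsplit, List.take_left' htl,
          List.take_succ_eq_append_getElem hlen, List.reverse_append,
          List.getD_eq_getElem nums 0 hlen]
        simp

theorem pvBuildB_unfold (ineqs : List String) (k : Nat) (digits : List Int) (i : Nat)
    (h : i ≤ k) :
    pvBuildB ineqs k digits i
      = (PySem.List.slice digits (some (i : Int)) (some ((pvRunEnd ineqs k i : Int) + 1))).reverse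
        ++ pvBuildB ineqs k digits (pvRunEnd ineqs k i + 1) := by
  rw [pvBuildB]
  simp only [dif_pos h]

theorem pvSel (ineqs : List String) (k : Nat) (digits : List Int)
    (hk : k ≤ ineqs.length) (hstop : k = ineqs.length ∨ ineqs.getD k "" ≠ "<")
    (hdl : digits.length = k + 1) :
    ∀ (i : Nat) (acc : List Int), i ≤ k + 1 →
      ((PySem.List.pyRange (i : Int) ((k : Int) + 1) 1).foldl (pvG ineqs) (digits.drop i, acc)).2
        = acc ++ pvBuildB ineqs k digits i := by
  intro i
  induction hn : k + 1 - i using Nat.strong_induction_on generalizing i with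
  | _ n ih =>
    intro acc hik
    by_cases he : i = k + 1
    · subst he
      rw [PySem.List.pyRange_one_eq_nil (by push_cast; omega), List.foldl_nil,
        pvBuildB, dif_neg (show ¬ (k + 1 ≤ k) from by omega)]
      simp
    · have hik' : i ≤ k := by omega
      set j := pvRunEnd ineqs k i with hj
      have hij : i ≤ j := pvRunEnd_ge ineqs k i
      have hjk : j ≤ k := pvRunEnd_le ineqs k i hik'
      have hv := pvLtRun_eq_runEnd ineqs k hk hstop i hik'
      rw [← hj] at hv
      have hsplit : PySem.List.pyRange (i : Int) ((k : Int) + 1) 1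
          = PySem.List.pyRange (i : Int) ((j : Int) + 1) 1
            ++ PySem.List.pyRange ((j : Int) + 1) ((k : Int) + 1) 1 :=
        PySem.List.pyRange_one_append _ _ _ (by omega) (by omega)
      rw [hsplit, List.foldl_append,
        pvPick_block ineqs j (by omega) i (digits.drop i) acc hij hv
          (by rw [List.length_drop, hdl]; omega)]
      have hdd : (digits.drop i).drop (j - i + 1) = digits.drop (j + 1) := by
        rw [List.drop_drop]
        congr 1
        omega
      have hc1 : ((j : Int) + 1) = ((j + 1 : Nat) : Int) := by push_cast; ring
      rw [hdd, hc1, ih (k + 1 - (j + 1)) (by omega) (j + 1) rfl _ (by omega)]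
      conv_rhs => rw [pvBuildB_unfold ineqs k digits i hik', ← hj]
      have hslice : (PySem.List.slice digits (some (i : Int)) (some ((j : Int) + 1))).reverse
          = ((digits.drop i).take (j - i + 1)).reverse := by
        rw [hc1, PySem.List.slice_natCast]
        congr 2
        omega
      rw [hslice, List.append_assoc]

theorem searchMax_lists_eq (ineqs : List String) (k : Int)
    (hpre : Pre_searchMax ineqs k) :
    searchMax ineqs k = searchMax_alt ineqs k := by
  rcases Int.lt_or_le k 0 with hneg | hpos
  · simp only [searchMax, searchMax_alt, if_pos hneg]
    rw [PySem.List.pyRange_one_eq_nil (show k + 1 ≤ 0 from by omega), List.foldl_nil]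
    simp
    decide
  · lift k to Nat using hpos with K
    have hk1 : K ≤ ineqs.length := by
      rcases hpre with h | ⟨h, _⟩
      · omega
      · exact_mod_cast h
    have hstop : K = ineqs.length ∨ ineqs.getD K "" ≠ "<" := by
      rcases hpre with h | ⟨_, h | h⟩
      · omega
      · left; exact_mod_cast h
      · right; rwa [PySem.List.pyGetD_natCast] at h
    simp only [searchMax, searchMax_alt, if_neg (show ¬ ((K : Int) < 0) from by omega)]
    rw [pvGvi_false]
    have hfun : (fun (st : List Int × List Int) (i : Int) =>
        (st.1.eraseIdx
            (PySem.List.pyGetD ((List.range (ineqs.length + 1)).map (fun j => (pvLtRun ineqs j : Int))) i 0).toNat,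
         st.2 ++ [PySem.List.pyGetD st.1
            (PySem.List.pyGetD ((List.range (ineqs.length + 1)).map (fun j => (pvLtRun ineqs j : Int))) i 0) 0]))
        = pvG ineqs := by
      funext st i; rfl
    rw [hfun]
    have hdl : (PySem.List.pyRange 9 (8 - (K : Int)) (-1)).length = K + 1 := by
      rw [PySem.List.length_pyRange_neg_one]
      omega
    have hsel := pvSel ineqs K (PySem.List.pyRange 9 (8 - (K : Int)) (-1)) hk1 hstop hdl 0 []
      (by omega)
    simp only [Nat.cast_zero, List.drop_zero, List.nil_append] at hsel
    rw [hsel, Int.toNat_natCast]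

-- ===== VERDICT (by name: the statement is the Claim_ definition above) =====
theorem searchMax_spec : Claim_equal_searchMax := by
  intro ineqs k _ hpre
  unfold Spec_searchMax
  exact searchMax_lists_eq ineqs k hpre
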